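-- pv_equiv track=rewrite | github.com/blackle/quecey-voip | hangman.py | guess_valuation
-- ===== SOURCE A (Python) =====
-- from typing import List, Set
--
-- def guess_valuation(guess: str, candidates: List[str]) -> int:
-- 	''' Returns how good we think this guess is, given the list of candidate words. '''
-- 	# `patterns` maps a bit mask like (1 << 2 | 1 << 3) to the number of words which have
-- 	# `guess` at the 2nd and 3rd index.
-- 	patterns = {}
-- 	for candidate in candidates:
-- 		# pattern = bit mask of where `guess` appears in `candidate`
-- 		pattern = 0
-- 		for letter in candidate:
-- 			pattern <<= 1
-- 			pattern |= int(letter == guess)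
-- 		patterns.setdefault(pattern, 0)
-- 		patterns[pattern] += 1
-- 	# we want to minimize the maximum possible number of candidates following
-- 	# our guess. so the rarer the most common pattern is, the better.
-- 	return -max(patterns.values())
-- ===== SOURCE B (Python) =====
-- def guess_valuation(guess, candidates):
--     ''' Returns how good we think this guess is, given the list of candidate words. '''
--     pats = sorted(_pattern(guess, c) for c in candidates)
--     best = 0
--     run = 0
--     prev = None
--     for p in pats:
--         run = run + 1 if p == prev else 1
--         prev = p
--         if run > best:
--             best = run
--     return -best
--
--
-- def _pattern(guess, candidate):
--     p = 0
--     for letter in candidate: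
--         p <<= 1
--         p |= int(letter == guess)
--     return p
-- ===== Notes on version B (the rewrite author's own statement) =====
-- stated objective: alternative
-- what changed: Replaces the incremental dict-of-pattern-counts with a sort of the per-candidate pattern list followed by a single pass that tracks the longest run of equal consecutive patterns.
import Mathlib
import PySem

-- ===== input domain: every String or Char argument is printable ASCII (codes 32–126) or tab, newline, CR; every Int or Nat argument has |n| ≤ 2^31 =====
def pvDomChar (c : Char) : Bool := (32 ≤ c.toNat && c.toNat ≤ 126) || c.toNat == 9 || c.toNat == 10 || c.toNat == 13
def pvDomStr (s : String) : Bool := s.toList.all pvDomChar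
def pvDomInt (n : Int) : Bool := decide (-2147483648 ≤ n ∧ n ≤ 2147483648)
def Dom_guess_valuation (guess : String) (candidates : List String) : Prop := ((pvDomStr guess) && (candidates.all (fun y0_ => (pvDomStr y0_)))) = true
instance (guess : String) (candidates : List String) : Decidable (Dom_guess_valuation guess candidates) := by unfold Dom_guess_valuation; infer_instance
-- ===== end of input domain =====

-- B replaces A's dict of pattern counts by sort-then-longest-run of equal consecutive patterns (alternative decomposition, same result).


-- ===== PORT A =====
-- the inner loop of both Pythons: bit mask of where `guess` appears in `candidate`
-- (for p ≥ 0 and b ∈ {0,1}, Python's `p <<= 1; p |= b` is exactly `2*p + b`)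
def pvPattern (guess : String) (candidate : String) : Int :=
  candidate.toList.foldl (fun p letter => 2 * p + (if String.ofList [letter] = guess then 1 else 0)) 0

def guess_valuation (guess : String) (candidates : List String) : Int :=
  let patterns : PySem.Dict Int Int := candidates.foldl (fun d candidate =>
    let pattern := pvPattern guess candidate
    let d := d.setdefault pattern 0
    d.insert pattern (d.getD pattern 0 + 1)) PySem.Dict.empty
  -- `max(patterns.values())`; `.getD 0` is unreachable under Pre_ (Python raises ValueError there)
  let m := (PySem.List.max? patterns.values (fun v => v)).getD 0
  (-m)

-- ===== PORT B =====
-- the body of B's run-counting loop: state = (best, run, prev)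
def pvRunStep (s : Int × Int × Option Int) (p : Int) : Int × Int × Option Int :=
  let run := if some p = s.2.2 then s.2.1 + 1 else 1
  (if run > s.1 then run else s.1, run, some p)

def guess_valuation_alt (guess : String) (candidates : List String) : Int :=
  let pats := PySem.List.sorted (candidates.map (fun c => pvPattern guess c)) (fun x => x) false
  let st := pats.foldl pvRunStep (0, 0, none)
  (-st.1)


-- ===== PRECONDITION & SPEC =====
-- Pre_ excludes only the empty candidate list, on which A raises ValueError (max() of an empty sequence).
def Pre_guess_valuation (guess : String) (candidates : List String) : Prop := candidates ≠ []
instance (guess : String) (candidates : List String) : Decidable (Pre_guess_valuation guess candidates) := by unfold Pre_guess_valuation; infer_instance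
def pvWitness_guess_valuation : String × List String := ("a", ["abc", "bca", "xyz"])

def Spec_guess_valuation (guess : String) (candidates : List String) (out : Int) : Prop := out = guess_valuation_alt guess candidates
instance (guess : String) (candidates : List String) (out : Int) : Decidable (Spec_guess_valuation guess candidates out) := by unfold Spec_guess_valuation; infer_instance

-- ===== CLAIM (what is proved, stated in full; the proofs are below) =====
def Claim_equal_guess_valuation : Prop := ∀ (guess : String) (candidates : List String), Dom_guess_valuation guess candidates → Pre_guess_valuation guess candidates → Spec_guess_valuation guess candidates (guess_valuation guess candidates)

-- ===== LEMMAS AND PROOFS =====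


-- A's loop body (setdefault then increment) is the standard counter step
lemma stepA_eq (d : PySem.Dict Int Int) (p : Int) :
    (d.setdefault p 0).insert p ((d.setdefault p 0).getD p 0 + 1) = d.insert p (d.getD p 0 + 1) := by
  by_cases h : d.contains p = true
  · rw [PySem.Dict.setdefault_of_contains d 0 h]
  · have h' : d.contains p = false := by simpa using h
    rw [PySem.Dict.setdefault_of_not_contains d 0 h']
    have h1 : (d.insert p 0).getD p 0 = 0 := by simp [pysem]
    have h2 : d.getD p 0 = 0 := by
      have hc := PySem.Dict.contains_eq_isSome_get? d p
      rw [h'] at hc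
      cases hg : d.get? p with
      | none => simp [PySem.Dict.getD, hg]
      | some v => rw [hg] at hc; simp at hc
    rw [h1, h2, PySem.Dict.insert_insert_self]

-- A's dict is Counter(patterns)
lemma dictA_eq (guess : String) (cs : List String) :
    cs.foldl (fun d c =>
      let pattern := pvPattern guess c
      let d := d.setdefault pattern 0
      d.insert pattern (d.getD pattern 0 + 1)) PySem.Dict.empty
      = PySem.Dict.counter (cs.map (pvPattern guess)) := by
  rw [← PySem.Dict.foldl_insert_getD_add_one_eq_counter, List.foldl_map]
  simp only [stepA_eq]

lemma pvRunStep_same (best run a : Int) :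
    pvRunStep (best, run, some a) a = (max best (run + 1), run + 1, some a) := by
  simp only [pvRunStep, max_def]
  split_ifs <;> simp_all <;> omega

lemma pvRunStep_diff (best run : Int) (prev : Option Int) (p : Int) (h : some p ≠ prev) :
    pvRunStep (best, run, prev) p = (max best 1, 1, some p) := by
  simp only [pvRunStep, if_neg h, max_def]
  split_ifs <;> simp_all <;> omega

-- fold over a block of equal elements continuing a run
lemma runBlock (n : Nat) : ∀ (a best run : Int), run ≤ best →
    (List.replicate n a).foldl pvRunStep (best, run, some a)
      = (max best (run + n), run + n, some a) := by
  induction n with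
  | zero => intro a best run h; simp [max_eq_left h]
  | succ n ih =>
    intro a best run h
    rw [List.replicate_succ, List.foldl_cons, pvRunStep_same,
      ih a (max best (run + 1)) (run + 1) (le_max_right _ _)]
    simp only [Prod.mk.injEq]
    refine ⟨?_, ?_, trivial⟩
    · simp only [max_def]; split_ifs <;> omega
    · omega

-- a nondecreasing list starts with a block of copies of its head
lemma chain_decomp : ∀ (t : List Int) (a : Int), (a :: t).Pairwise (· ≤ ·) →
    ∃ (n : Nat) (u : List Int), a :: t = List.replicate (n + 1) a ++ u ∧
      (∀ x ∈ u, a < x) ∧ u.Pairwise (· ≤ ·) := by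
  intro t
  induction t with
  | nil => intro a _; exact ⟨0, [], by simp, by simp, List.Pairwise.nil⟩
  | cons b t' ih =>
    intro a h
    rcases List.pairwise_cons.mp h with ⟨hale, h2⟩
    by_cases hab : a = b
    · subst hab
      rcases ih a h2 with ⟨n, u, he, hlt, hu⟩
      refine ⟨n + 1, u, ?_, hlt, hu⟩
      rw [List.replicate_succ, List.cons_append, ← he]
    · have hab' : a < b := lt_of_le_of_ne (hale b (by simp)) hab
      refine ⟨0, b :: t', by simp, ?_, h2⟩
      intro x hx
      rcases List.mem_cons.mp hx with rfl | hx'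
      · exact hab'
      · exact lt_of_lt_of_le hab' ((List.pairwise_cons.mp h2).1 x hx')

-- the invariant of B's run-counting fold over a nondecreasing list
lemma runMain (N : Nat) : ∀ (s : List Int), s.length ≤ N → s.Pairwise (· ≤ ·) →
    ∀ (best run : Int) (prev : Option Int), (∀ x ∈ s, prev ≠ some x) → run ≤ best →
    best ≤ (s.foldl pvRunStep (best, run, prev)).1 ∧
    (∀ x ∈ s, ((s.count x : Nat) : Int) ≤ (s.foldl pvRunStep (best, run, prev)).1) ∧
    ((s.foldl pvRunStep (best, run, prev)).1 = best ∨
      ∃ x ∈ s, (s.foldl pvRunStep (best, run, prev)).1 = ((s.count x : Nat) : Int)) := by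
  induction N with
  | zero =>
    intro s hlen _ best run prev _ _
    have : s = [] := List.length_eq_zero_iff.mp (Nat.le_zero.mp hlen)
    subst this
    exact ⟨le_refl _, by simp, Or.inl rfl⟩
  | succ N ih =>
    intro s hlen hchain best run prev hprev hrb
    match s, hlen, hchain, hprev with
    | [], _, _, _ => exact ⟨le_refl _, by simp, Or.inl rfl⟩
    | a :: t, hlen, hchain, hprev =>
      rcases chain_decomp t a hchain with ⟨n, u, he, hlt, hu⟩
      have hulen : u.length ≤ N := by
        have := congrArg List.length he
        simp [List.length_replicate] at this
        simp at hlen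
        omega
      have hfold : (a :: t).foldl pvRunStep (best, run, prev)
          = u.foldl pvRunStep (max (max best 1) (1 + n), 1 + n, some a) := by
        rw [he, List.foldl_append, List.replicate_succ, List.foldl_cons,
          pvRunStep_diff best run prev a (fun hc => hprev a (by simp) hc.symm),
          runBlock n a (max best 1) 1 (le_max_right _ _)]
      have huprev : ∀ x ∈ u, (some a : Option Int) ≠ some x := by
        intro x hx hc
        exact absurd (Option.some.inj hc) (ne_of_lt (hlt x hx))
      rcases ih u hulen hu (max (max best 1) (1 + n)) (1 + n) (some a) huprev
        (le_max_right _ _) with ⟨hB1, hcnt, hlast⟩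
      rw [hfold]
      set R := (u.foldl pvRunStep (max (max best 1) (1 + n), 1 + n, some a)).1 with hR
      have hbestR : best ≤ R := le_trans (le_trans (le_max_left _ _) (le_max_left _ _)) hB1
      have hnR : (1 : Int) + n ≤ R := le_trans (le_max_right _ _) hB1
      have hcount_a : (a :: t).count a = n + 1 := by
        have hua : u.count a = 0 :=
          List.count_eq_zero.mpr (fun hc => absurd (hlt a hc) (lt_irrefl a))
        rw [he, List.count_append, hua, List.count_replicate]
        simp
      have hcount_u : ∀ x ∈ u, (a :: t).count x = u.count x := by
        intro x hx
        have hxa : x ≠ a := ne_of_gt (hlt x hx)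
        rw [he, List.count_append, List.count_replicate, if_neg (by simpa using (Ne.symm hxa))]
        simp
      refine ⟨hbestR, ?_, ?_⟩
      · intro x hx
        rcases (by rw [he] at hx; exact List.mem_append.mp hx) with hxr | hxu
        · have : x = a := (List.eq_of_mem_replicate hxr)
          subst this
          rw [hcount_a]
          push_cast
          omega
        · rw [hcount_u x hxu]
          exact hcnt x hxu
      · rcases hlast with hRB | ⟨x, hxu, hRx⟩
        · rcases le_total best (1 + n) with hcase | hcase
          · refine Or.inr ⟨a, by simp, ?_⟩
            rw [hcount_a]
            have h1 : max best 1 ≤ 1 + n := max_le hcase (by omega)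
            rw [hRB, max_eq_right h1]
            push_cast
            omega
          · refine Or.inl ?_
            have h1 : (1 : Int) ≤ best := by omega
            rw [hRB, max_eq_left h1, max_eq_left hcase]
        · refine Or.inr ⟨x, ?_, ?_⟩
          · rw [he]; exact List.mem_append_right _ hxu
          · rw [hcount_u x hxu]; exact hRx

-- B's fold over the sorted pattern list computes the maximal multiplicity
lemma alt_is_max_count (ps : List Int) (hne : ps ≠ []) :
    PySem.List.max? ((PySem.Set.ofList ps).map (fun k => ((ps.count k : Nat) : Int))) (fun v => v)
      = some ((PySem.List.sorted ps (fun x => x) false).foldl pvRunStep (0, 0, none)).1 := by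
  set s := PySem.List.sorted ps (fun x => x) false with hs
  have hperm : s.Perm ps := PySem.List.sorted_perm ps (fun x => x) false
  have hchain : s.Pairwise (· ≤ ·) := PySem.List.sorted_pairwise ps (fun x => x)
  rcases runMain s.length s (le_refl _) hchain 0 0 none (by simp) (le_refl _)
    with ⟨_, hcnt, hlast⟩
  set R := (s.foldl pvRunStep (0, 0, none)).1 with hRdef
  have hsne : s ≠ [] := by
    intro hc
    exact hne ((PySem.List.sorted_eq_nil_iff ps (fun x => x) false).mp hc)
  obtain ⟨a0, hs0⟩ := List.exists_mem_of_ne_nil s hsne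
  have hRcount : ∃ x ∈ s, R = ((s.count x : Nat) : Int) := by
    rcases hlast with hR0 | h
    · exfalso
      have h1 : (1 : Int) ≤ ((s.count a0 : Nat) : Int) := by
        have := List.count_pos_iff.mpr hs0

        omega
      have := hcnt a0 hs0
      omega
    · exact h
  set L := (PySem.Set.ofList ps).map (fun k => ((ps.count k : Nat) : Int)) with hL
  have hLne : L ≠ [] := by
    obtain ⟨p0, hp0⟩ := List.exists_mem_of_ne_nil ps hne
    have : p0 ∈ PySem.Set.ofList ps := (PySem.Set.mem_ofList ps p0).mpr hp0
    intro hc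
    rw [hL, List.map_eq_nil_iff] at hc
    rw [hc] at this
    simp at this
  obtain ⟨m, hm⟩ : ∃ m, PySem.List.max? L (fun v => v) = some m := by
    cases h : PySem.List.max? L (fun v => v) with
    | none => exact absurd ((PySem.List.max?_eq_none_iff L _).mp h) hLne
    | some m => exact ⟨m, rfl⟩
  have hmem := PySem.List.max?_mem hm
  rcases List.mem_map.mp hmem with ⟨k, hk, hkm⟩
  have hkps : k ∈ ps := (PySem.Set.mem_ofList ps k).mp hk
  have hks : k ∈ s := hperm.mem_iff.mpr hkps
  have hcounts : ∀ x, ps.count x = s.count x := fun x => (hperm.count_eq x).symm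
  have hmR : m ≤ R := by
    rw [← hkm, hcounts k]
    exact hcnt k hks
  have hRm : R ≤ m := by
    rcases hRcount with ⟨x, hxs, hRx⟩
    have hxps : x ∈ ps := hperm.mem_iff.mp hxs
    have hRL : R ∈ L := by
      rw [hL]
      refine List.mem_map.mpr ⟨x, (PySem.Set.mem_ofList ps x).mpr hxps, ?_⟩
      rw [hcounts x, ← hRx]
    have := PySem.List.max?_isMax hm R hRL
    simpa using this
  rw [hm, le_antisymm hmR hRm]

-- ===== VERDICT (by name: the statement is the Claim_ definition above) =====
theorem guess_valuation_spec : Claim_equal_guess_valuation := by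
  intro guess candidates _ hpre
  unfold Spec_guess_valuation guess_valuation guess_valuation_alt
  simp only [dictA_eq]
  have hvals : (PySem.Dict.counter (candidates.map (fun c => pvPattern guess c))).values
      = (PySem.Set.ofList (candidates.map (fun c => pvPattern guess c))).map
          (fun k => (((candidates.map (fun c => pvPattern guess c)).count k : Nat) : Int)) := by
    simp only [PySem.Dict.values, PySem.Dict.items_counter, List.map_map]
    rfl
  unfold Pre_guess_valuation at hpre
  rw [hvals, alt_is_max_count _ (by simp [hpre])]
  rfl
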